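-- pv_equiv track=rewrite | github.com/inkstar/OD_pre | 0525A.py | transf
-- ===== SOURCE A (Python) =====
-- def well(a:int,b:int):
--     return 4*a+3*b+2
--
-- def transf(a:str):
--     num1=0
--     stack=[]
--     flag=0
--     if '#' not in a:
--         return int(a)
--     for i in a:
--         if i.isnumeric():
--             num1=num1*10+int(i)
--         elif i=='#' and flag==0:
--             flag=1
--             stack.append(num1)
--             num1=0
--         elif i=='#' and flag==1:
--             stack.append(well(stack.pop(),num1))
--             num1=0
--     stack.append(well(stack.pop(),num1))
--     return stack.pop()
-- ===== SOURCE B (Python) =====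
-- def well(a: int, b: int):
--     return 4*a+3*b+2
--
--
-- def transf(a: str):
--     if '#' not in a:
--         return int(a)
--     nums = []
--     for seg in a.split('#'):
--         n = 0
--         for c in seg:
--             if c.isnumeric():
--                 n = n*10 + int(c)
--         nums.append(n)
--     acc = nums[0]
--     for x in nums[1:]:
--         acc = well(acc, x)
--     return acc
-- ===== Notes on version B (the rewrite author's own statement) =====
-- stated objective: simpler
-- what changed: A's single interleaved loop with a stack and a flag is replaced by a two-phase computation: split the string on '#', parse each segment's digits, then left-fold the segment numbers with well.
import Mathlib
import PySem

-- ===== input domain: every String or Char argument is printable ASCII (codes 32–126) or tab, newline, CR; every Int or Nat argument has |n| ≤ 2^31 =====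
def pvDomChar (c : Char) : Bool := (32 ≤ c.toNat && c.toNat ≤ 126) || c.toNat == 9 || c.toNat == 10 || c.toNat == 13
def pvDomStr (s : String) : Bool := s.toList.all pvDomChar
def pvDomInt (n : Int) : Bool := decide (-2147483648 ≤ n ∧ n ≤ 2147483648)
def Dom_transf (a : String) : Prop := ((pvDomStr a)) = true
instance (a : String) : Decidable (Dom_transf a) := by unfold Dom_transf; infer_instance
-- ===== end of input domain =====

-- B replaces A's single interleaved stack/flag loop by a two-phase split-on-'#' then left-fold with `well` (objective: simpler).

-- ===== PORT A =====
def well (a b : Int) : Int := 4*a + 3*b + 2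

-- one loop step of A: state (num1, stack, flag).  On the ASCII domain `i.isnumeric()` is exactly
-- `isdigit`, and `int(i)` on a digit char is its value c - 48.  `stack.pop()` on an empty stack
-- (IndexError in Python) is modelled by `getLast?.getD 0`; it is unreachable: flag = 1 ↔ stack ≠ [].
def transfStep (st : Int × List Int × Int) (c : Char) : Int × List Int × Int :=
  let (num1, stack, flag) := st
  if PySem.Chars.isdigit c then (num1*10 + ((c.toNat : Int) - 48), stack, flag)
  else if c = '#' ∧ flag = 0 then (0, stack ++ [num1], 1)
  else if c = '#' ∧ flag = 1 then (0, stack.dropLast ++ [well (stack.getLast?.getD 0) num1], 1)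
  else (num1, stack, flag)

-- A's last two statements: stack.append(well(stack.pop(), num1)); return stack.pop()
def transfFin (st : Int × List Int × Int) : Int :=
  let (num1, stack, _) := st
  (stack.dropLast ++ [well (stack.getLast?.getD 0) num1]).getLast?.getD 0

def transf (a : String) : Int :=
  if PySem.Str.isIn "#" a = false then (PySem.Int.ofStr? a).getD 0  -- int(a); ValueError excluded by Pre_
  else transfFin (a.toList.foldl transfStep (0, [], 0))

-- ===== PORT B =====
-- the inner per-segment loop of Source B
def numSeg (seg : List Char) : Int :=
  seg.foldl (fun n c => if PySem.Chars.isdigit c then n*10 + ((c.toNat : Int) - 48) else n) 0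

def transf_alt (a : String) : Int :=
  if PySem.Str.isIn "#" a = false then (PySem.Int.ofStr? a).getD 0  -- int(a); ValueError excluded by Pre_
  else
    match (PySem.Chars.splitOn a.toList ['#']).map numSeg with
    | [] => 0                    -- unreachable: split never returns an empty list
    | h :: t => t.foldl well h   -- acc = nums[0]; for x in nums[1:]: acc = well(acc, x)

-- ===== PRECONDITION & SPEC =====
-- Pre_ excludes exactly the inputs where A raises: strings without '#' that are not a valid
-- Python int literal, on which `int(a)` raises ValueError (B raises there too).
def Pre_transf (a : String) : Prop :=
  PySem.Str.isIn "#" a = false → (PySem.Int.ofStr? a).isSome = true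
instance (a : String) : Decidable (Pre_transf a) := by unfold Pre_transf; infer_instance
def pvWitness_transf : String := "12#3#45"
def Spec_transf (a : String) (out : Int) : Prop := out = transf_alt a
instance (a : String) (out : Int) : Decidable (Spec_transf a out) := by unfold Spec_transf; infer_instance

-- ===== CLAIM (what is proved, stated in full; the proofs are below) =====
def Claim_equal_transf : Prop := ∀ (a : String), Dom_transf a → Pre_transf a → Spec_transf a (transf a)

-- ===== LEMMAS AND PROOFS =====

-- reference splitter: what `s.split('#')` produces, with `pre` the chars of the current segment
def mySplit (pre : List Char) : List Char → List (List Char)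
  | [] => [pre]
  | c :: rest => if c = '#' then pre :: mySplit [] rest else mySplit (pre ++ [c]) rest

lemma splitOn_go_spec : ∀ (fuel : Nat) (l cur : List Char) (accs : List (List Char)),
    l.length ≤ fuel →
    PySem.Chars.splitOn.go ['#'] fuel l cur accs = accs.reverse ++ mySplit cur.reverse l := by
  intro fuel
  induction fuel with
  | zero =>
    intro l cur accs h
    have : l = [] := by cases l <;> simp_all
    subst this
    simp [PySem.Chars.splitOn.go, mySplit]
  | succ f ih =>
    intro l cur accs h
    cases l with
    | nil => simp [PySem.Chars.splitOn.go, mySplit]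
    | cons c rest =>
      by_cases hc : c = '#'
      · subst hc
        rw [PySem.Chars.splitOn.go]
        simp only [List.isPrefixOf, BEq.rfl, Bool.true_and, if_pos]
        rw [ih _ _ _ (by simpa using Nat.le_of_succ_le_succ h)]
        simp [mySplit]
      · rw [PySem.Chars.splitOn.go]
        have : List.isPrefixOf ['#'] (c :: rest) = false := by
          simp [List.isPrefixOf]; exact fun h' => (hc h'.symm).elim
        rw [this]
        simp only [Bool.false_eq_true, if_false]
        rw [ih _ _ _ (by simpa using Nat.le_of_succ_le_succ h), List.reverse_cons]
        simp [mySplit, hc]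

lemma splitOn_eq_mySplit (cs : List Char) :
    PySem.Chars.splitOn cs ['#'] = mySplit [] cs := by
  rw [PySem.Chars.splitOn, splitOn_go_spec _ _ _ _ (by omega)]
  simp

-- shared reference evaluator: value after the first '#', with v the combined value so far, n the digits read
def evalTail (v n : Int) : List Char → Int
  | [] => well v n
  | c :: rest =>
    if c = '#' then evalTail (well v n) 0 rest
    else if PySem.Chars.isdigit c then evalTail v (n*10 + ((c.toNat : Int) - 48)) rest
    else evalTail v n rest

-- reference evaluator for the phase before the first '#'
def eval0 (n : Int) : List Char → Int
  | [] => 0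
  | c :: rest =>
    if c = '#' then evalTail n 0 rest
    else if PySem.Chars.isdigit c then eval0 (n*10 + ((c.toNat : Int) - 48)) rest
    else eval0 n rest

lemma isdigit_hash : PySem.Chars.isdigit '#' = false := by decide

lemma A_tail : ∀ (cs : List Char) (n v : Int),
    transfFin (cs.foldl transfStep (n, [v], 1)) = evalTail v n cs := by
  intro cs
  induction cs with
  | nil => intro n v; simp [transfFin, evalTail, well]
  | cons c rest ih =>
    intro n v
    by_cases hd : PySem.Chars.isdigit c = true
    · have hc : ¬ c = '#' := by rintro rfl; simp [isdigit_hash] at hd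
      simp only [List.foldl_cons, transfStep, hd, if_pos, evalTail, hc, if_false]
      exact ih _ _
    · by_cases hc : c = '#'
      · subst hc
        simp only [List.foldl_cons, transfStep, isdigit_hash, evalTail]
        norm_num
        exact ih _ _
      · simp only [List.foldl_cons, transfStep, hd, evalTail, hc]
        norm_num [hd, hc]
        exact ih _ _

lemma A_head : ∀ (cs : List Char) (n : Int), '#' ∈ cs →
    transfFin (cs.foldl transfStep (n, [], 0)) = eval0 n cs := by
  intro cs
  induction cs with
  | nil => intro n h; simp at h
  | cons c rest ih =>
    intro n hmem
    by_cases hc : c = '#'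
    · subst hc
      simp only [List.foldl_cons, transfStep, isdigit_hash, eval0]
      norm_num
      exact A_tail _ _ _
    · have hmem' : '#' ∈ rest := by
        rcases List.mem_cons.mp hmem with h | h
        · exact absurd h.symm hc
        · exact h
      by_cases hd : PySem.Chars.isdigit c = true
      · simp only [List.foldl_cons, transfStep, hd, if_pos, eval0, hc, if_false]
        exact ih _ hmem'
      · simp only [List.foldl_cons, transfStep, hd, eval0, hc]
        norm_num [hd, hc]
        exact ih _ hmem'

lemma B_tail : ∀ (cs : List Char) (v : Int) (pre : List Char),
    List.foldl well v ((mySplit pre cs).map numSeg) = evalTail v (numSeg pre) cs := by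
  intro cs
  induction cs with
  | nil => intro v pre; simp [mySplit, evalTail]
  | cons c rest ih =>
    intro v pre
    by_cases hc : c = '#'
    · subst hc
      simp only [mySplit, if_pos, List.map_cons, List.foldl_cons, evalTail, isdigit_hash]
      rw [ih]
      simp [numSeg]
    · have hpre : numSeg (pre ++ [c]) =
          if PySem.Chars.isdigit c then numSeg pre * 10 + ((c.toNat : Int) - 48) else numSeg pre := by
        simp [numSeg, List.foldl_append]
      simp only [mySplit, hc, if_false, evalTail]
      rw [ih, hpre]
      by_cases hd : PySem.Chars.isdigit c = true <;> simp [hd]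

lemma B_head : ∀ (cs : List Char) (pre : List Char), '#' ∈ cs →
    (match (mySplit pre cs).map numSeg with
     | [] => (0 : Int)
     | h :: t => t.foldl well h) = eval0 (numSeg pre) cs := by
  intro cs
  induction cs with
  | nil => intro pre h; simp at h
  | cons c rest ih =>
    intro pre hmem
    by_cases hc : c = '#'
    · subst hc
      simp only [mySplit, if_pos, List.map_cons, eval0, isdigit_hash]
      rw [B_tail]
      simp [numSeg]
    · have hmem' : '#' ∈ rest := by
        rcases List.mem_cons.mp hmem with h | h
        · exact absurd h.symm hc
        · exact h
      have hpre : numSeg (pre ++ [c]) =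
          if PySem.Chars.isdigit c then numSeg pre * 10 + ((c.toNat : Int) - 48) else numSeg pre := by
        simp [numSeg, List.foldl_append]
      simp only [mySplit, hc, if_false, eval0]
      rw [ih _ hmem', hpre]
      by_cases hd : PySem.Chars.isdigit c = true <;> norm_num [hd, hc]

-- ===== VERDICT (by name: the statement is the Claim_ definition above) =====
theorem transf_spec : Claim_equal_transf := by
  intro a _ _
  unfold Spec_transf transf transf_alt
  rw [PySem.Str.isIn_eq, show "#".toList = ['#'] from rfl]
  by_cases hin : PySem.Chars.isIn ['#'] a.toList = false
  · rw [if_pos hin, if_pos hin]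
  · have h1 : PySem.Chars.isIn ['#'] a.toList = true := by
      cases h : PySem.Chars.isIn ['#'] a.toList
      · exact absurd h hin
      · rfl
    have hmem : '#' ∈ a.toList := ((PySem.Chars.isIn_iff_infix _ _).mp h1).subset (by simp)
    rw [if_neg hin, if_neg hin, A_head _ _ hmem, splitOn_eq_mySplit]
    have := B_head a.toList [] hmem
    simp only [numSeg, List.foldl_nil] at this
    rw [this]
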